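-- pv_equiv track=rewrite | github.com/SourceCodeArman/cashly | backend/apps/transactions/management/commands/generate_plaid_category_mappings.py | _generate_mapping_dict_with_comments
-- ===== SOURCE A (Python) =====
-- def _generate_mapping_dict_with_comments(mapping, var_name):
--     """Generate Python dictionary code with comments grouped by primary category."""
--     lines = [f"# Mapping of Plaid {var_name.replace('PLAID_', '').replace('_MAPPING', '').lower().replace('_', ' ')} to system category names",
--              f"# Format: \"PLAID_CATEGORY\": (\"system_category_name\", \"category_type\")",
--              f"{var_name} = {{"]
--
--     # Group by primary category prefix for better organization
--     from collections import defaultdict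
--     by_primary = defaultdict(list)
--
--     for key in sorted(mapping.keys()):
--         # Extract primary category prefix
--         parts = key.split('_')
--         if len(parts) >= 2:
--             # For detailed categories, take first two parts (e.g., "FOOD_AND_DRINK")
--             # For primary-only categories, just use the key
--             if len(parts) > 2:
--                 primary = '_'.join(parts[:2])  # e.g., "FOOD_AND_DRINK"
--             else:
--                 primary = key  # Primary category itself
--         else:
--             primary = key
--         by_primary[primary].append(key)
--
--     # Generate organized output grouped by primary category
--     sorted_primaries = sorted(by_primary.keys())
--     for i, primary in enumerate(sorted_primaries):
--         # Add comment for primary category group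
--         primary_display = primary.replace('_', ' ').title()
--         lines.append(f"    # {primary_display}")
--
--         for key in sorted(by_primary[primary]):
--             system_category, category_type = mapping[key]
--             lines.append(f'    "{key}": ("{system_category}", "{category_type}"),')
--
--         # Add blank line between groups (except last)
--         if i < len(sorted_primaries) - 1:
--             lines.append("")
--
--     lines.append("}")
--
--     return "\n".join(lines)
-- ===== SOURCE B (Python) =====
-- def _generate_mapping_dict_with_comments(mapping, var_name):
--     """Generate Python dictionary code with comments grouped by primary category.
--
--     Single pass over the (primary, key)-sorted flat pair list instead of a
--     defaultdict grouping with nested re-sorting."""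
--     lines = [f"# Mapping of Plaid {var_name.replace('PLAID_', '').replace('_MAPPING', '').lower().replace('_', ' ')} to system category names",
--              f"# Format: \"PLAID_CATEGORY\": (\"system_category_name\", \"category_type\")",
--              f"{var_name} = {{"]
--
--     def primary_of(key):
--         parts = key.split('_')
--         if len(parts) > 2:
--             return '_'.join(parts[:2])
--         return key
--
--     pairs = sorted((primary_of(key), key) for key in mapping)
--
--     current = None
--     for primary, key in pairs:
--         if primary != current:
--             if current is not None:
--                 lines.append("")
--             lines.append(f"    # {primary.replace('_', ' ').title()}")
--             current = primary
--         system_category, category_type = mapping[key]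
--         lines.append(f'    "{key}": ("{system_category}", "{category_type}"),')
--
--     lines.append("}")
--     return "\n".join(lines)
-- ===== Notes on version B (the rewrite author's own statement) =====
-- stated objective: alternative
-- what changed: B replaces A's defaultdict grouping with nested re-sorting by computing a flat (primary, key) pair list, sorting it once by the tuple, and emitting the grouped output in a single pass over it with a current-primary accumulator.
import Mathlib
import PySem

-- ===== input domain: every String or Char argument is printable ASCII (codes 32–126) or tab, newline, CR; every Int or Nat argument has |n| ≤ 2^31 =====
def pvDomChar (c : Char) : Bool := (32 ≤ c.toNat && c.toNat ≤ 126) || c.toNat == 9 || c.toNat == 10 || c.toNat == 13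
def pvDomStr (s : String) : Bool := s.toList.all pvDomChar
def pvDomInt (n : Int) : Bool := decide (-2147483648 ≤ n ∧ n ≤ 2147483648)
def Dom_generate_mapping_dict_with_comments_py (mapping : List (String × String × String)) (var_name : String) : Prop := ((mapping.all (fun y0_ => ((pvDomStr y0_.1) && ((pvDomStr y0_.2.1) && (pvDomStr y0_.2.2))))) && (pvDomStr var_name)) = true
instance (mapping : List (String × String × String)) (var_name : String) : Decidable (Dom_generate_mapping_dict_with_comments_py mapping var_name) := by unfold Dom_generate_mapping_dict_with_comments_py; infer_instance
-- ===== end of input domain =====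

-- B re-implements A by sorting the flat (primary, key) pair list once and emitting groups in a
-- single pass with a current-primary accumulator, instead of A's defaultdict grouping with
-- nested re-sorting; same output (objective: alternative decomposition).

-- ===== shared primitive ports (helpers both Pythons spell identically) =====

-- hand port of str.title(): exact on the ASCII domain, where the cased characters are
-- exactly the ASCII letters (PySem.Chars.isalpha)
def pvTitleChars : Bool → List Char → List Char
  | _, [] => []
  | prev, c :: cs =>
      (if PySem.Chars.isalpha c then
        (if prev then PySem.Chars.lowerChar c else PySem.Chars.upperChar c)
      else c) :: pvTitleChars (PySem.Chars.isalpha c) cs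

def pvTitle (s : String) : String := String.ofList (pvTitleChars false s.toList)

-- f"    # {primary.replace('_', ' ').title()}"
def pvCommentLine (p : String) : String := "    # " ++ pvTitle (PySem.Str.replace p "_" " ")

-- f'    "{key}": ("{system_category}", "{category_type}"),'  with mapping[key] looked up in d
def pvEntryLine (d : PySem.Dict String (String × String)) (k : String) : String :=
  let v := d.getD k ("", "")
  "    \"" ++ k ++ "\": (\"" ++ v.1 ++ "\", \"" ++ v.2 ++ "\"),"

-- the three header lines (identical f-strings in both Pythons)
def pvHeaderLines (var_name : String) : List String :=
  ["# Mapping of Plaid " ++ PySem.Str.replace (PySem.Str.lower (PySem.Str.replace (PySem.Str.replace var_name "PLAID_" "") "_MAPPING" "")) "_" " " ++ " to system category names",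
   "# Format: \"PLAID_CATEGORY\": (\"system_category_name\", \"category_type\")",
   var_name ++ " = {"]

-- ===== PORT A =====
-- A's inline primary-prefix extraction (nested ifs, as in A's loop body)
def pvPrimaryA (key : String) : String :=
  if 2 ≤ (PySem.Chars.splitOn key.toList ['_']).length then
    (if 2 < (PySem.Chars.splitOn key.toList ['_']).length then
      String.ofList (PySem.Chars.join ['_'] ((PySem.Chars.splitOn key.toList ['_']).take 2))
    else key)
  else key

def generate_mapping_dict_with_comments_py (mapping : List (String × String × String)) (var_name : String) : String :=
  let lines0 : List String := pvHeaderLines var_name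
  let d : PySem.Dict String (String × String) := PySem.Dict.ofList mapping
  let by_primary : PySem.Dict String (List String) :=
    (PySem.List.sorted d.keys (fun k => k) false).foldl
      (fun bp key => bp.modify (pvPrimaryA key) [] (fun v => v ++ [key])) PySem.Dict.empty
  let sorted_primaries := PySem.List.sorted by_primary.keys (fun p => p) false
  let lines := (PySem.List.enumerate sorted_primaries).foldl
    (fun lines ip =>
      let lines := lines ++ [pvCommentLine ip.2]
      let lines := (PySem.List.sorted (by_primary.getD ip.2 []) (fun k => k) false).foldl
        (fun lines key => lines ++ [pvEntryLine d key]) lines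
      if ip.1 < PySem.List.len sorted_primaries - 1 then lines ++ [""] else lines)
    lines0
  PySem.Str.join "\n" (lines ++ ["}"])

-- ===== PORT B =====
-- B's primary_of helper (single if, as in Source B)
def pvPrimaryB (key : String) : String :=
  if 2 < (PySem.Chars.splitOn key.toList ['_']).length then
    String.ofList (PySem.Chars.join ['_'] ((PySem.Chars.splitOn key.toList ['_']).take 2))
  else key

-- the body of B's single loop over the sorted pair list
def pvBStep (d : PySem.Dict String (String × String))
    (st : Option String × List String) (t : String × String) : Option String × List String :=
  if st.1 = some t.1 then (st.1, st.2 ++ [pvEntryLine d t.2])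
  else (some t.1,
    (if st.1.isSome then st.2 ++ [""] else st.2) ++ [pvCommentLine t.1, pvEntryLine d t.2])

def generate_mapping_dict_with_comments_py_alt (mapping : List (String × String × String)) (var_name : String) : String :=
  let lines0 : List String := pvHeaderLines var_name
  let d : PySem.Dict String (String × String) := PySem.Dict.ofList mapping
  let pairs := PySem.List.sorted2 (d.keys.map (fun key => (pvPrimaryB key, key)))
    (fun t => t.1) (fun t => t.2) false
  let st := pairs.foldl (pvBStep d) (none, lines0)
  PySem.Str.join "\n" (st.2 ++ ["}"])

-- ===== PRECONDITION & SPEC =====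
def Spec_generate_mapping_dict_with_comments_py (mapping : List (String × String × String)) (var_name : String) (out : String) : Prop := out = generate_mapping_dict_with_comments_py_alt mapping var_name
instance (mapping : List (String × String × String)) (var_name : String) (out : String) : Decidable (Spec_generate_mapping_dict_with_comments_py mapping var_name out) := by unfold Spec_generate_mapping_dict_with_comments_py; infer_instance

-- ===== CLAIM (what is proved, stated in full; the proofs are below) =====
def Claim_equal_generate_mapping_dict_with_comments_py : Prop := ∀ (mapping : List (String × String × String)) (var_name : String), Dom_generate_mapping_dict_with_comments_py mapping var_name → Spec_generate_mapping_dict_with_comments_py mapping var_name (generate_mapping_dict_with_comments_py mapping var_name)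

-- ===== LEMMAS AND PROOFS =====

theorem pvPrimaryA_eq (k : String) : pvPrimaryA k = pvPrimaryB k := by
  unfold pvPrimaryA pvPrimaryB
  split_ifs <;> first | rfl | omega

-- blocks of lines joined by a blank line
def pvInterB : List (List String) → List String
  | [] => []
  | [b] => b
  | b :: b' :: bs => b ++ "" :: pvInterB (b' :: bs)

-- the canonical line list both ports produce (header ++ blank-separated group blocks)
def pvCanonLines (mapping : List (String × String × String)) (var_name : String) : List String :=
  let d := PySem.Dict.ofList mapping
  let ks := PySem.List.sorted d.keys (fun k => k) false
  let sp := PySem.List.sorted (PySem.Set.ofList (ks.map pvPrimaryB)) (fun p => p) false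
  pvHeaderLines var_name ++
    pvInterB (sp.map (fun p => pvCommentLine p :: (ks.filter (fun k => pvPrimaryB k == p)).map (pvEntryLine d)))

-- A's enumerate loop with a trailing blank line after every group but the last
theorem pvAfold (Bl : String → List String) (n : Int) :
    ∀ (xs : List String) (j : Int), j + xs.length = n → ∀ (acc : List String),
    List.foldl (fun lines ip => if ip.1 < n - 1 then (lines ++ Bl ip.2) ++ [""] else lines ++ Bl ip.2)
      acc (PySem.List.enumerate xs j)
    = acc ++ pvInterB (xs.map Bl) := by
  intro xs
  induction xs with
  | nil => intro j h acc; simp [PySem.List.enumerate, pvInterB]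
  | cons x xs ih =>
    intro j h acc
    have hcons : PySem.List.enumerate (x::xs) j = (j, x) :: PySem.List.enumerate xs (j+1) := by
      simp [PySem.List.enumerate]
    rw [hcons]
    simp only [List.foldl_cons]
    cases xs with
    | nil =>
      have : ¬ (j < n - 1) := by simp at h; omega
      simp [this, PySem.List.enumerate, pvInterB]
    | cons y ys =>
      have hlt : j < n - 1 := by simp at h; omega
      rw [if_pos hlt, ih (j+1) (by simp at h ⊢; omega)]
      simp [pvInterB]

-- B's loop over one group whose primary is already current
theorem pvBfold_group (d : PySem.Dict String (String × String)) (p : String) :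
    ∀ (ks acc : List String),
    List.foldl (pvBStep d) (some p, acc) (ks.map (fun k => (p, k))) = (some p, acc ++ ks.map (pvEntryLine d)) := by
  intro ks
  induction ks with
  | nil => intro acc; simp
  | cons k ks ih =>
    intro acc
    simp only [List.map_cons, List.foldl_cons]
    rw [show pvBStep d (some p, acc) (p, k) = (some p, acc ++ [pvEntryLine d k]) from by
      simp [pvBStep], ih]
    simp

-- B's loop over the whole grouped pair list
theorem pvBfold (d : PySem.Dict String (String × String)) (g : String → List String) :
    ∀ (sps : List String) (cur : Option String) (acc : List String),
    (∀ p ∈ sps, g p ≠ []) → List.Pairwise (fun a b => a ≠ b) sps → (∀ p ∈ sps, cur ≠ some p) →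
    List.foldl (pvBStep d) (cur, acc) (sps.flatMap (fun p => (g p).map (fun k => (p, k))))
    = (sps.getLast?.elim cur some,
       acc ++ (if cur.isSome ∧ sps ≠ [] then [""] else []) ++
         pvInterB (sps.map (fun p => pvCommentLine p :: (g p).map (pvEntryLine d)))) := by
  intro sps
  induction sps with
  | nil => intro cur acc _ _ _; simp [pvInterB]
  | cons p rest ih =>
    intro cur acc hne hpw hcur
    obtain ⟨k0, ktail, hgp⟩ : ∃ k0 ktail, g p = k0 :: ktail := by
      cases h : g p with
      | nil => exact absurd h (hne p (by simp))
      | cons a b => exact ⟨a, b, rfl⟩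
    have hcurp : ¬ (cur = some p) := hcur p (by simp)
    rw [List.flatMap_cons, List.foldl_append, hgp, List.map_cons, List.foldl_cons]
    rw [show pvBStep d (cur, acc) (p, k0)
        = (some p, ((if cur.isSome then acc ++ [""] else acc) ++ [pvCommentLine p, pvEntryLine d k0])) from by
      simp [pvBStep, hcurp]]
    rw [pvBfold_group, ih (some p) _ (fun q hq => hne q (by simp [hq])) hpw.tail
        (fun q hq h => (List.pairwise_cons.mp hpw).1 q hq (by injection h))]
    rcases rest with _ | ⟨q, rest'⟩
    · cases cur <;> simp [pvInterB, hgp]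
    · cases hl : (q :: rest').getLast? with
      | none => simp at hl
      | some z => cases cur <;> simp [pvInterB, hgp, hl]

-- concatenating the per-primary filters over a nodup covering list is a permutation of ks
theorem pvPartitionPerm (prim : String → String) :
    ∀ (ps ks : List String), ps.Nodup → (∀ k ∈ ks, prim k ∈ ps) →
    (ps.flatMap (fun p => ks.filter (fun k => prim k == p))).Perm ks := by
  intro ps
  induction ps with
  | nil =>
    intro ks _ hcov
    have : ks = [] := by
      cases ks with
      | nil => rfl
      | cons a l => exact absurd (hcov a (by simp)) (by simp)
    simp [this]
  | cons p ps ih =>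
    intro ks hnd hcov
    rw [List.flatMap_cons]
    have hflat : ps.flatMap (fun q => ks.filter (fun k => prim k == q))
        = ps.flatMap (fun q => (ks.filter (fun k => !(prim k == p))).filter (fun k => prim k == q)) := by
      apply List.flatMap_congr
      intro q hq
      rw [List.filter_filter]
      apply List.filter_congr
      intro k _
      cases h : (prim k == q) with
      | false => simp
      | true =>
        have hq' : prim k = q := by simpa using h
        have hne : ¬ (prim k == p) = true := by
          simp only [beq_iff_eq, hq']
          intro hqp
          exact (List.nodup_cons.mp hnd).1 (hqp ▸ hq)
        simp [hne]
    rw [hflat]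
    have hperm2 : (ps.flatMap (fun q => (ks.filter (fun k => !(prim k == p))).filter (fun k => prim k == q))).Perm
        (ks.filter (fun k => !(prim k == p))) := by
      apply ih _ (List.nodup_cons.mp hnd).2
      intro k hk
      have hkks := List.mem_of_mem_filter hk
      have hkp : ¬ (prim k == p) = true := by
        have := List.of_mem_filter hk; simpa using this
      have := hcov k hkks
      simp only [List.mem_cons] at this
      rcases this with h | h
      · exact absurd (by simp [h]) hkp
      · exact h
    exact (hperm2.append_left _).trans (List.filter_append_perm _ ks)

-- Python's tuple sort of string pairs is sorting by the lexicographic key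
theorem pvSorted2_lex (l : List (String × String)) :
    PySem.List.sorted2 l (fun t => t.1) (fun t => t.2) false
    = PySem.List.sorted l (fun t => (toLex t : Lex (String × String))) false := by
  unfold PySem.List.sorted2 PySem.List.sorted
  simp only [if_neg (by decide : ¬ (false = true))]
  congr 1
  funext acc x
  congr 1
  funext a b
  show (decide (a.1 < b.1) || !decide (b.1 < a.1) && decide (a.2 < b.2))
      = decide ((toLex a : Lex (String × String)) < toLex b)
  rcases lt_trichotomy a.1 b.1 with h | h | h
  · simp [h, Prod.Lex.lt_iff]
  · simp [h, Prod.Lex.lt_iff]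
  · simp [h, not_lt_of_gt h, ne_of_gt h, Prod.Lex.lt_iff]

-- the grouped pair list is strictly increasing in the lexicographic order
theorem pvCanonPairwise (sps : List String) (g : String → List String)
    (hs : sps.Pairwise (· < ·)) (hg : ∀ p, (g p).Pairwise (· < ·)) :
    (sps.flatMap (fun p => (g p).map (fun k => (p, k)))).Pairwise
      (fun a b => (toLex a : Lex (String × String)) < toLex b) := by
  rw [List.flatMap_def, List.pairwise_flatten]
  constructor
  · intro l hl
    simp only [List.mem_map] at hl
    obtain ⟨p, -, rfl⟩ := hl
    rw [List.pairwise_map]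
    exact (hg p).imp (fun h => by simp [Prod.Lex.lt_iff, h])
  · rw [List.pairwise_map]
    exact hs.imp (fun {p q} h => by
      intro x hx y hy
      simp only [List.mem_map] at hx hy
      obtain ⟨k1, -, rfl⟩ := hx
      obtain ⟨k2, -, rfl⟩ := hy
      simp [Prod.Lex.lt_iff, h])

-- the grouping dict A builds, characterised
theorem pvGroupGetD (ks : List String) (c : String) :
    ((ks.foldl (fun bp key => bp.modify (pvPrimaryB key) [] (fun v => v ++ [key])) PySem.Dict.empty).getD c [])
    = ks.filter (fun k => pvPrimaryB k == c) := by
  have h : (ks.foldl (fun bp key => bp.modify (pvPrimaryB key) [] (fun v => v ++ [key])) PySem.Dict.empty)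
      = ((ks.map (fun k => (pvPrimaryB k, k))).foldl
          (fun bp (t : String × String) => bp.modify t.1 [] (fun v => v ++ [t.2])) PySem.Dict.empty) := by
    rw [List.foldl_map]
  rw [h, PySem.Dict.getD_foldl_modify_append, PySem.Dict.getD_empty, List.filter_map, List.map_map]
  simp [Function.comp_def]

theorem pvGroupKeys (ks : List String) :
    (ks.foldl (fun bp key => bp.modify (pvPrimaryB key) [] (fun v => v ++ [key])) PySem.Dict.empty).keys
    = PySem.Set.ofList (ks.map pvPrimaryB) := by
  rw [PySem.Dict.keys_foldl_modify_key ks pvPrimaryB [] (fun _ key => (fun v => v ++ [key])), PySem.Dict.keys_empty]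
  rfl

theorem pvA_eq (mapping : List (String × String × String)) (var_name : String) :
    generate_mapping_dict_with_comments_py mapping var_name
    = PySem.Str.join "\n" (pvCanonLines mapping var_name ++ ["}"]) := by
  unfold generate_mapping_dict_with_comments_py pvCanonLines
  simp only [pvPrimaryA_eq, pvGroupGetD, pvGroupKeys]
  set d := PySem.Dict.ofList mapping with hd
  set ks := PySem.List.sorted d.keys (fun k => k) false with hks
  set sp := PySem.List.sorted (PySem.Set.ofList (ks.map pvPrimaryB)) (fun k => k) false with hsp
  have h2 : ks.Pairwise (fun a b => a ≤ b) := PySem.List.sorted_pairwise d.keys (fun k => k)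
  have hsortf : ∀ p, PySem.List.sorted (ks.filter (fun k => pvPrimaryB k == p)) (fun k => k) false
      = ks.filter (fun k => pvPrimaryB k == p) :=
    fun p => PySem.List.sorted_eq_self_of_pairwise _ _ (List.Pairwise.sublist List.filter_sublist h2)
  simp only [hsortf]
  have hfun : (fun (lines : List String) (ip : Int × String) =>
      if ip.1 < PySem.List.len sp - 1 then
        List.foldl (fun lines key => lines ++ [pvEntryLine d key]) (lines ++ [pvCommentLine ip.2])
          (ks.filter (fun k => pvPrimaryB k == ip.2)) ++ [""]
      else
        List.foldl (fun lines key => lines ++ [pvEntryLine d key]) (lines ++ [pvCommentLine ip.2])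
          (ks.filter (fun k => pvPrimaryB k == ip.2)))
      = (fun (lines : List String) (ip : Int × String) =>
        if ip.1 < (sp.length : Int) - 1 then
          (lines ++ (pvCommentLine ip.2 :: (ks.filter (fun k => pvPrimaryB k == ip.2)).map (pvEntryLine d))) ++ [""]
        else
          lines ++ (pvCommentLine ip.2 :: (ks.filter (fun k => pvPrimaryB k == ip.2)).map (pvEntryLine d))) := by
    funext lines ip
    simp only [PySem.List.foldl_append_singleton_eq_map, PySem.List.len_eq]
    split <;> simp
  rw [hfun, pvAfold (fun p => pvCommentLine p :: (ks.filter (fun k => pvPrimaryB k == p)).map (pvEntryLine d))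
    ((sp.length : Int)) sp 0 (by simp)]

theorem pvB_eq (mapping : List (String × String × String)) (var_name : String) :
    generate_mapping_dict_with_comments_py_alt mapping var_name
    = PySem.Str.join "\n" (pvCanonLines mapping var_name ++ ["}"]) := by
  unfold generate_mapping_dict_with_comments_py_alt pvCanonLines
  simp only []
  rw [pvSorted2_lex]
  set d := PySem.Dict.ofList mapping with hd
  set ks := PySem.List.sorted d.keys (fun k => k) false with hks
  set sp := PySem.List.sorted (PySem.Set.ofList (ks.map pvPrimaryB)) (fun k => k) false with hsp
  have hndk : d.keys.Nodup := PySem.Dict.nodup_keys_ofList mapping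
  have hnd : ks.Nodup := (PySem.List.sorted_perm d.keys (fun k => k) false).nodup_iff.mpr hndk
  have h2 : ks.Pairwise (fun a b => a ≤ b) := PySem.List.sorted_pairwise d.keys (fun k => k)
  have h3 : ks.Pairwise (fun a b => a < b) := (h2.and hnd).imp (fun h => lt_of_le_of_ne h.1 h.2)
  have hsplt : sp.Pairwise (fun a b => a < b) := PySem.List.sorted_ofList_pairwise_lt (ks.map pvPrimaryB)
  have hspne : sp.Pairwise (fun a b => a ≠ b) := hsplt.imp ne_of_lt
  have hspmem : ∀ p, p ∈ sp ↔ p ∈ ks.map pvPrimaryB := fun p => by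
    rw [hsp, PySem.List.mem_sorted]; exact PySem.Set.mem_ofList _ _
  have hgne : ∀ p ∈ sp, ks.filter (fun k => pvPrimaryB k == p) ≠ [] := by
    intro p hp
    obtain ⟨k, hk, hpk⟩ := List.mem_map.mp ((hspmem p).mp hp)
    exact List.ne_nil_of_mem (List.mem_filter.mpr ⟨hk, by simp [hpk]⟩)
  have hsorted : PySem.List.sorted (d.keys.map (fun key => (pvPrimaryB key, key)))
      (fun t => (toLex t : Lex (String × String))) false
      = sp.flatMap (fun p => (ks.filter (fun k => pvPrimaryB k == p)).map (fun k => (p, k))) := by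
    apply PySem.List.sorted_eq_of_perm_of_pairwise_lt
    · have e1 : sp.flatMap (fun p => (ks.filter (fun k => pvPrimaryB k == p)).map (fun k => (p, k)))
          = (sp.flatMap (fun p => ks.filter (fun k => pvPrimaryB k == p))).map (fun k => (pvPrimaryB k, k)) := by
        rw [List.map_flatMap]
        apply List.flatMap_congr
        intro p _
        apply List.map_congr_left
        intro k hk
        have := List.of_mem_filter hk
        simp only [beq_iff_eq] at this
        rw [this]
      rw [e1]
      have hpart : (sp.flatMap (fun p => ks.filter (fun k => pvPrimaryB k == p))).Perm ks :=
        pvPartitionPerm pvPrimaryB sp ks hspne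
          (fun k hk => (hspmem _).mpr (List.mem_map_of_mem hk))
      exact (hpart.map _).trans ((PySem.List.sorted_perm d.keys (fun k => k) false).map _)
    · exact pvCanonPairwise sp _ hsplt (fun p => List.Pairwise.sublist List.filter_sublist h3)
  rw [hsorted, pvBfold d (fun p => ks.filter (fun k => pvPrimaryB k == p)) sp none
    (pvHeaderLines var_name) hgne hspne (by simp)]
  simp

-- ===== VERDICT (by name: the statement is the Claim_ definition above) =====
theorem generate_mapping_dict_with_comments_py_spec : Claim_equal_generate_mapping_dict_with_comments_py := by
  intro mapping var_name _
  unfold Spec_generate_mapping_dict_with_comments_py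
  rw [pvA_eq, pvB_eq]
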